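-- pv_equiv track=rewrite | github.com/Aerospace91/advent-of-code | 2024/Day2/day2.py | part1
-- ===== SOURCE A (Python) =====
-- def part1(report):
--
--     def is_valid(line):
--         diffs = [b - a for a, b in zip(line, line[1:])]
--         increasing = all(d > 0 for d in diffs)
--         decreasing = all(d < 0 for d in diffs)
--         valid_steps = all(abs(d) in (1, 2, 3) for d in diffs)
--         return (increasing or decreasing) and valid_steps
--
--     return [is_valid(line) for line in report]
-- ===== SOURCE B (Python) =====
-- def part1(report):
--     def is_valid(line):
--         asc = line == sorted(line)
--         desc = line == sorted(line, reverse=True)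
--         steps = all(1 <= abs(b - a) <= 3 for a, b in zip(line, line[1:]))
--         return (asc or desc) and steps
--     return [is_valid(line) for line in report]
-- ===== Notes on version B (the rewrite author's own statement) =====
-- stated objective: alternative
-- what changed: is_valid no longer builds a diff list and scans it three times for signs; B decides direction by comparing the line with its sorted (and reverse-sorted) copy and makes one zip pass checking 1<=|b-a|<=3, which also rules out equal neighbours so non-strict sortedness coincides with A's strict monotonicity.
import Mathlib
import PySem

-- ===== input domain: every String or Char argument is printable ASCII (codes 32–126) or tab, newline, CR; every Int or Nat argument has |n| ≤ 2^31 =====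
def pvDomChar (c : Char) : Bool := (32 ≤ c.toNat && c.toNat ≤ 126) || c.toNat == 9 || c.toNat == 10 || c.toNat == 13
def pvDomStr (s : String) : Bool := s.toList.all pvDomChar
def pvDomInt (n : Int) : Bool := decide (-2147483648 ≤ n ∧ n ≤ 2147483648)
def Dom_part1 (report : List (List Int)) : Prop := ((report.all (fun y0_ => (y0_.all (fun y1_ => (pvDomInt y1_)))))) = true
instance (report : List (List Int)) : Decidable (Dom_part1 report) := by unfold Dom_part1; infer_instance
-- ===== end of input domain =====

-- B replaces A's diff list and its three sign scans by a sorted-copy comparison for direction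
-- plus one adjacent-pair pass for the step sizes (objective: alternative; same observable value).

-- ===== PORT A =====
-- is_valid: diffs list, then three 'all' scans over it
def part1IsValid (line : List Int) : Bool :=
  let diffs := (line.zip (line.drop 1)).map (fun p => p.2 - p.1)   -- zip(line, line[1:]); line[1:] = drop 1 (exact for this nonneg slice)
  let increasing := diffs.all (fun d => decide (d > 0))
  let decreasing := diffs.all (fun d => decide (d < 0))
  let valid_steps := diffs.all (fun d => decide (|d| = 1 ∨ |d| = 2 ∨ |d| = 3))  -- abs(d) in (1, 2, 3)
  (increasing || decreasing) && valid_steps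

def part1 (report : List (List Int)) : List Bool :=
  report.map part1IsValid

-- ===== PORT B =====
-- is_valid: compare with sorted copies for direction, one zip pass for steps
def part1AltIsValid (line : List Int) : Bool :=
  let asc := decide (line = PySem.List.sorted line (fun x => x) false)         -- line == sorted(line)
  let desc := decide (line = PySem.List.sorted line (fun x => x) true)         -- line == sorted(line, reverse=True)
  let steps := (line.zip (line.drop 1)).all
    (fun p => decide (1 ≤ |p.2 - p.1| ∧ |p.2 - p.1| ≤ 3))                     -- all(1 <= abs(b-a) <= 3 …)
  (asc || desc) && steps

def part1_alt (report : List (List Int)) : List Bool :=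
  report.map part1AltIsValid

-- ===== PRECONDITION & SPEC =====
def Spec_part1 (report : List (List Int)) (out : List Bool) : Prop := out = part1_alt report
instance (report : List (List Int)) (out : List Bool) : Decidable (Spec_part1 report out) := by unfold Spec_part1; infer_instance

-- ===== CLAIM (what is proved, stated in full; the proofs are below) =====
def Claim_equal_part1 : Prop := ∀ (report : List (List Int)), Dom_part1 report → Spec_part1 report (part1 report)

-- ===== LEMMAS AND PROOFS =====

theorem isChain_and {α : Type} {r s : α → α → Prop} {l : List α}
    (hr : List.IsChain r l) (hs : List.IsChain s l) :
    List.IsChain (fun a b => r a b ∧ s a b) l := by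
  induction l with
  | nil => exact List.IsChain.nil
  | cons a t ih =>
    cases t with
    | nil => exact List.isChain_singleton a
    | cons b u =>
      rw [List.isChain_cons_cons] at hr hs ⊢
      exact ⟨⟨hr.1, hs.1⟩, ih hr.2 hs.2⟩

-- adjacent-pair 'all' over zip(line, line[1:]) is exactly Chain'
theorem zip_tail_all_iff_chain' (r : Int → Int → Prop) [DecidablePred fun p : Int × Int => r p.1 p.2]
    (line : List Int) :
    ((line.zip (line.drop 1)).all (fun p => decide (r p.1 p.2)) = true) ↔ List.IsChain r line := by
  induction line with
  | nil => simp [List.IsChain.nil]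
  | cons a t ih =>
    cases t with
    | nil => simp [List.IsChain.singleton]
    | cons b u =>
      simp only [List.drop_one, List.tail_cons, List.zip_cons_cons, List.all_cons,
        Bool.and_eq_true, decide_eq_true_eq, List.isChain_cons_cons]
      rw [← ih]
      simp

theorem asc_iff_chain_le (line : List Int) :
    line = PySem.List.sorted line (fun x => x) false ↔ List.IsChain (· ≤ ·) line := by
  constructor
  · intro h
    rw [List.isChain_iff_pairwise]
    have := PySem.List.sorted_pairwise (xs := line) (key := fun x : Int => x) (κ := Int)
    rw [← h] at this
    exact this
  · intro h
    rw [List.isChain_iff_pairwise] at h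
    exact (PySem.List.sorted_eq_self_of_pairwise (xs := line) (key := fun x : Int => x) h).symm

theorem desc_iff_chain_ge (line : List Int) :
    line = PySem.List.sorted line (fun x => x) true ↔ List.IsChain (· ≥ ·) line := by
  constructor
  · intro h
    rw [List.isChain_iff_pairwise]
    have := PySem.List.sorted_pairwise_rev (xs := line) (key := fun x : Int => x) (κ := Int)
    rw [← h] at this
    exact this
  · intro h
    rw [List.isChain_iff_pairwise] at h
    exact (PySem.List.sorted_rev_eq_self_of_pairwise (xs := line) (key := fun x : Int => x) h).symm

theorem isValid_eq (line : List Int) : part1IsValid line = part1AltIsValid line := by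
  unfold part1IsValid part1AltIsValid
  by_cases hs : List.IsChain (fun a b : Int => 1 ≤ |b - a| ∧ |b - a| ≤ 3) line
  · -- steps hold: every adjacent difference is nonzero, so strict and non-strict coincide
    have hstepA : (line.zip (line.drop 1)).all
        (fun p => decide (|p.2 - p.1| = 1 ∨ |p.2 - p.1| = 2 ∨ |p.2 - p.1| = 3)) = true := by
      rw [zip_tail_all_iff_chain' (fun a b => |b - a| = 1 ∨ |b - a| = 2 ∨ |b - a| = 3)]
      exact hs.imp (fun h => by omega)
    have hstepB : (line.zip (line.drop 1)).all
        (fun p => decide (1 ≤ |p.2 - p.1| ∧ |p.2 - p.1| ≤ 3)) = true := by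
      rw [zip_tail_all_iff_chain' (fun a b => 1 ≤ |b - a| ∧ |b - a| ≤ 3)]
      exact hs
    have hinc : ((line.zip (line.drop 1)).all (fun p => decide (p.2 - p.1 > 0)))
        = decide (line = PySem.List.sorted line (fun x => x) false) := by
      rw [Bool.eq_iff_iff, zip_tail_all_iff_chain' (fun a b => b - a > 0),
        decide_eq_true_iff, asc_iff_chain_le]
      constructor
      · exact fun h => h.imp (fun h => by omega)
      · intro h
        exact (isChain_and h hs).imp (fun {a b} hab => by have h1 : a ≤ b := hab.1; have h2 := hab.2; rcases abs_cases (b - a) with h3 | h3 <;> omega)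
    have hdec : ((line.zip (line.drop 1)).all (fun p => decide (p.2 - p.1 < 0)))
        = decide (line = PySem.List.sorted line (fun x => x) true) := by
      rw [Bool.eq_iff_iff, zip_tail_all_iff_chain' (fun a b => b - a < 0),
        decide_eq_true_iff, desc_iff_chain_ge]
      constructor
      · exact fun h => h.imp (fun h => by omega)
      · intro h
        exact (isChain_and h hs).imp (fun {a b} hab => by have h1 : b ≤ a := hab.1; have h2 := hab.2; rcases abs_cases (b - a) with h3 | h3 <;> omega)
    simp only [List.all_map, Function.comp_def]
    rw [hstepA, hstepB, hinc, hdec]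
  · -- steps fail: both sides are false
    have hA : (line.zip (line.drop 1)).all
        (fun p => decide (|p.2 - p.1| = 1 ∨ |p.2 - p.1| = 2 ∨ |p.2 - p.1| = 3)) = false := by
      rw [Bool.eq_false_iff, Ne, zip_tail_all_iff_chain' (fun a b => |b - a| = 1 ∨ |b - a| = 2 ∨ |b - a| = 3)]
      intro h; exact hs (h.imp (fun h => by omega))
    have hB : (line.zip (line.drop 1)).all
        (fun p => decide (1 ≤ |p.2 - p.1| ∧ |p.2 - p.1| ≤ 3)) = false := by
      rw [Bool.eq_false_iff, Ne, zip_tail_all_iff_chain' (fun a b => 1 ≤ |b - a| ∧ |b - a| ≤ 3)]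
      exact hs
    simp only [List.all_map, Function.comp_def]
    rw [hA, hB]
    simp

-- ===== VERDICT (by name: the statement is the Claim_ definition above) =====
theorem part1_spec : Claim_equal_part1 := by
  intro report _
  unfold Spec_part1 part1 part1_alt
  exact List.map_congr_left (fun line _ => isValid_eq line)
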